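-- pv_equiv track=rewrite | github.com/eli-fin/java_native_dbg_agent | scripts/python.py | split_exs_by_class
-- ===== SOURCE A (Python) =====
-- def get_ex_class(ex):
--     start = ex.find('class=')+len('class=')+1
--     end = ex.find(';', start)
--     return ex[start:end].replace('/', '.')
--
-- def split_exs_by_class(exs):
-- 	lst =  {}
-- 	for ex in exs:
-- 		cls=get_ex_class(ex)
-- 		if not cls in lst:
-- 			lst[cls]=[]
-- 		lst[cls].append(ex)
-- 	return lst
-- ===== SOURCE B (Python) =====
-- def get_ex_class(ex):
--     start = ex.find('class=')+len('class=')+1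
--     end = ex.find(';', start)
--     return ex[start:end].replace('/', '.')
--
-- def split_exs_by_class(exs):
--     keys = list(dict.fromkeys(map(get_ex_class, exs)))
--     return {k: [ex for ex in exs if get_ex_class(ex) == k] for k in keys}
-- ===== Notes on version B (the rewrite author's own statement) =====
-- stated objective: alternative
-- what changed: Replaces the single-pass dict accumulation (create-empty-then-append per element) with a two-phase scheme: first dedup the class keys in first-occurrence order via dict.fromkeys, then build each group by a filtering comprehension over the input.
import Mathlib
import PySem

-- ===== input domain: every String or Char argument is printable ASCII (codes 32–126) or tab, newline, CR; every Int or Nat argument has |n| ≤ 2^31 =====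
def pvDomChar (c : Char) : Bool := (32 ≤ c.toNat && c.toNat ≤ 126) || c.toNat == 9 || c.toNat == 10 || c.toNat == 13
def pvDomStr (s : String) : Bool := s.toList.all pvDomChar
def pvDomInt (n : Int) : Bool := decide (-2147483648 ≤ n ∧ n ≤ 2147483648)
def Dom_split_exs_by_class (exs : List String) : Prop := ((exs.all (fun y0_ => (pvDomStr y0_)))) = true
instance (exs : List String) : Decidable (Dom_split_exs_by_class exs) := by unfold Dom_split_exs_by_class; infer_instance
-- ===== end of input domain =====

-- B replaces A's single-pass dict accumulation by a two-phase scheme (dedup the keys,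
-- then filter the input per key); same result, no speed claim (objective: alternative).

-- ===== PORT A =====
-- shared helper, byte-for-byte identical in A and B
def get_ex_class (ex : String) : String :=
  let start := PySem.Str.find ex "class=" + (6 : Int) + 1
  let e := PySem.Str.findFrom ex ";" start
  PySem.Str.replace (PySem.Str.slice ex (some start) (some e)) "/" "."

def split_exs_by_class (exs : List String) : List (String × List String) :=
  (exs.foldl (fun lst ex =>
    let cls := get_ex_class ex
    let lst := if lst.contains cls then lst else lst.insert cls ([] : List String)
    lst.modify cls [] (· ++ [ex])) PySem.Dict.empty).items

-- ===== PORT B =====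
def split_exs_by_class_alt (exs : List String) : List (String × List String) :=
  let keys := PySem.List.dedup (exs.map get_ex_class)
  keys.map (fun k => (k, exs.filter (fun ex => get_ex_class ex == k)))

-- ===== PRECONDITION & SPEC =====
def Spec_split_exs_by_class (exs : List String) (out : List (String × List String)) : Prop := out = split_exs_by_class_alt exs
instance (exs : List String) (out : List (String × List String)) : Decidable (Spec_split_exs_by_class exs out) := by unfold Spec_split_exs_by_class; infer_instance

-- ===== CLAIM (what is proved, stated in full; the proofs are below) =====
def Claim_equal_split_exs_by_class : Prop := ∀ (exs : List String), Dom_split_exs_by_class exs → Spec_split_exs_by_class exs (split_exs_by_class exs)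

-- ===== LEMMAS AND PROOFS =====

-- A's loop body ("if absent: insert []; then append") is extensionally dict.modify
theorem step_eq_modify (d : PySem.Dict String (List String)) (ex : String) :
    (if d.contains (get_ex_class ex) then d else d.insert (get_ex_class ex) ([] : List String)).modify
      (get_ex_class ex) [] (· ++ [ex])
    = d.modify (get_ex_class ex) [] (· ++ [ex]) := by
  by_cases h : d.contains (get_ex_class ex) = true
  · simp [h]
  · simp only [Bool.not_eq_true] at h
    simp only [h, Bool.false_eq_true, if_false, PySem.Dict.modify,
      PySem.Dict.getD_insert_self, PySem.Dict.insert_insert_self,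
      PySem.Dict.getD_of_not_contains d [] h, List.nil_append]

theorem split_equal (exs : List String) :
    split_exs_by_class exs = split_exs_by_class_alt exs := by
  unfold split_exs_by_class split_exs_by_class_alt
  simp only
  rw [PySem.List.foldl_congr_mem exs _
        (fun d ex => d.modify (get_ex_class ex) [] (· ++ [ex])) PySem.Dict.empty
        (fun d ex _ => step_eq_modify d ex)]
  have hnd : (exs.foldl (fun d ex => d.modify (get_ex_class ex) [] (· ++ [ex]))
      PySem.Dict.empty).keys.Nodup := by
    exact PySem.Dict.nodup_keys_foldl_modify_key exs get_ex_class []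
      (fun _ ex v => v ++ [ex]) PySem.Dict.empty (by simp)
  rw [PySem.Dict.items_eq_map_keys _ hnd []]
  rw [PySem.Dict.keys_foldl_modify_key exs get_ex_class [] (fun _ ex v => v ++ [ex])]
  have hkeys : PySem.Set.update (PySem.Dict.empty : PySem.Dict String (List String)).keys
      (exs.map get_ex_class) = PySem.List.dedup (exs.map get_ex_class) := by
    simp [PySem.Dict.keys_empty, PySem.Set.update_nil_left]
  rw [hkeys]
  refine List.map_congr_left (fun k _ => ?_)
  have hg : (exs.foldl (fun d ex => d.modify (get_ex_class ex) [] (· ++ [ex]))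
      PySem.Dict.empty).getD k [] = exs.filter (fun ex => get_ex_class ex == k) := by
    have := PySem.Dict.getD_foldl_modify_append
      (exs.map (fun ex => (get_ex_class ex, ex))) (PySem.Dict.empty) k
    rw [List.foldl_map] at this
    simpa [List.filter_map, Function.comp_def] using this
  rw [hg]

-- ===== VERDICT (by name: the statement is the Claim_ definition above) =====
theorem split_exs_by_class_spec : Claim_equal_split_exs_by_class := by
  intro exs _
  unfold Spec_split_exs_by_class
  exact split_equal exs
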